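-- pv_equiv track=rewrite | github.com/ashahi10/HMBDchatbot | backend/pipeline/hmdb_api.py | analyze_missing_fields
-- ===== SOURCE A (Python) =====
-- from typing import Any, Dict, Optional, List
--
-- field_alias_map = {
--     # Singular/plural inconsistencies
--     "normal_concentrations": ["normal_concentration"],
--     "abnormal_concentrations": ["abnormal_concentration"],
--
--     # Alternative field names for the same concept
--     "monoisotopic_molecular_weight": ["moldb_mono_mass", "monisotopic_molecular_weight"],
--     "ions": ["ion", "ion_results", "ion_data"],
--
--     # Common field aliases
--     "chemical_formula": ["moldb_formula"],
--     "molecular_weight": ["moldb_average_mass", "average_molecular_weight"],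
--     "smiles": ["moldb_smiles"],
--     "inchi": ["moldb_inchi"],
--     "inchikey": ["moldb_inchikey"],
-- }
--
-- def analyze_missing_fields(data: Dict[str, Any], required_fields: list) -> list:
--     """
--     Analyze a data dictionary to determine which required fields are missing.
--     Takes into account field aliases when determining if a field is present.
--
--     Args:
--         data: Dictionary of data to analyze
--         required_fields: List of fields that are required
--
--     Returns:
--         List of fields that are missing from the data
--     """
--     if not data:
--         return required_fields
--
--     missing_fields = []
--     for field in required_fields:
--         # Field is directly present in data
--         if field in data:
--             continue
--
--         # Check if any aliases of the field are present in data
--         if field in field_alias_map: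
--             alias_found = False
--             for alias in field_alias_map[field]:
--                 if alias in data:
--                     alias_found = True
--                     break
--             if alias_found:
--                 continue
--
--         # If we get here, neither the field nor any of its aliases were found
--         missing_fields.append(field)
--
--     return missing_fields
-- ===== SOURCE B (Python) =====
-- field_alias_map = {
--     # Singular/plural inconsistencies
--     "normal_concentrations": ["normal_concentration"],
--     "abnormal_concentrations": ["abnormal_concentration"],
--
--     # Alternative field names for the same concept
--     "monoisotopic_molecular_weight": ["moldb_mono_mass", "monisotopic_molecular_weight"],
--     "ions": ["ion", "ion_results", "ion_data"],
--
--     # Common field aliases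
--     "chemical_formula": ["moldb_formula"],
--     "molecular_weight": ["moldb_average_mass", "average_molecular_weight"],
--     "smiles": ["moldb_smiles"],
--     "inchi": ["moldb_inchi"],
--     "inchikey": ["moldb_inchikey"],
-- }
--
-- # Reverse alias map, computed once: each alias string -> its canonical field.
-- _reverse_alias_map = {}
-- for _canonical, _aliases in field_alias_map.items():
--     for _a in _aliases:
--         _reverse_alias_map[_a] = _canonical
--
--
-- def analyze_missing_fields(data, required_fields):
--     if not data:
--         return required_fields
--     # One pass over the data keys builds the set of covered fields:
--     # every key covers itself, and an alias also covers its canonical field.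
--     covered = set()
--     for key in data:
--         covered.add(key)
--         canonical = _reverse_alias_map.get(key)
--         if canonical is not None:
--             covered.add(canonical)
--     return [f for f in required_fields if f not in covered]
-- ===== Notes on version B (the rewrite author's own statement) =====
-- stated objective: alternative
-- what changed: Instead of probing the data dict per required field and scanning that field's alias list, B precomputes a reverse alias map once and makes a single pass over the data keys building a 'covered' set (each key plus its canonical field), then filters required_fields against that set.
import Mathlib
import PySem

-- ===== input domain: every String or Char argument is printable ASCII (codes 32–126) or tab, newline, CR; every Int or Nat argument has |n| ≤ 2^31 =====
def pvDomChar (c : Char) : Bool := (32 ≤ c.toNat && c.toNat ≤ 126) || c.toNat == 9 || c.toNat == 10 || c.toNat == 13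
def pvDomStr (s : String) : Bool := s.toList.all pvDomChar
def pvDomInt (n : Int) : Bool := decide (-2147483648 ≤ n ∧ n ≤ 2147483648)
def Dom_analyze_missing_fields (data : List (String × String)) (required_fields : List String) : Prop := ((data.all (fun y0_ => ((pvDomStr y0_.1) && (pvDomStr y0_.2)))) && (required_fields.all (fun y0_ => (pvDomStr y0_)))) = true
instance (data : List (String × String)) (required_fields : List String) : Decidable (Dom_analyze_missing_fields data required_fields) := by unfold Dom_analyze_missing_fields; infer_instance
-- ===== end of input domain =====

-- B precomputes a reverse alias map and builds a covered-set in one pass over the data keys,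
-- instead of A's per-required-field probing; same return value (alternative decomposition).


-- ===== PORT A =====
-- the module constant field_alias_map (shared context of both implementations)
def fieldAliasMap : List (String × List String) := [
  ("normal_concentrations", ["normal_concentration"]),
  ("abnormal_concentrations", ["abnormal_concentration"]),
  ("monoisotopic_molecular_weight", ["moldb_mono_mass", "monisotopic_molecular_weight"]),
  ("ions", ["ion", "ion_results", "ion_data"]),
  ("chemical_formula", ["moldb_formula"]),
  ("molecular_weight", ["moldb_average_mass", "average_molecular_weight"]),
  ("smiles", ["moldb_smiles"]),
  ("inchi", ["moldb_inchi"]),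
  ("inchikey", ["moldb_inchikey"])]

def analyze_missing_fields (data : List (String × String)) (required_fields : List String) : List String :=
  if data.isEmpty then required_fields
  else
    required_fields.foldl (fun missing field =>
      -- field directly present in data
      if data.any (fun kv => kv.1 == field) then missing
      else
        -- check whether any alias of the field is present in data
        match fieldAliasMap.find? (fun kv => kv.1 == field) with
        | some pr =>
            if pr.2.any (fun a => data.any (fun kv => kv.1 == a)) then missing
            else missing ++ [field]
        | none => missing ++ [field]) []

-- ===== PORT B =====
-- reverse alias map, computed once: alias -> canonical field
def reverseAliasMap : PySem.Dict String String :=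
  fieldAliasMap.foldl
    (fun rev pr => pr.2.foldl (fun rev a => rev.insert a pr.1) rev)
    PySem.Dict.empty

def analyze_missing_fields_alt (data : List (String × String)) (required_fields : List String) : List String :=
  if data.isEmpty then required_fields
  else
    let covered : PySem.Set String :=
      data.foldl (fun cov kv =>
        let cov := PySem.Set.add cov kv.1
        match reverseAliasMap.get? kv.1 with
        | some canonical => PySem.Set.add cov canonical
        | none => cov) PySem.Set.empty
    required_fields.filter (fun f => !(covered.contains f))

-- ===== PRECONDITION & SPEC =====
def Spec_analyze_missing_fields (data : List (String × String)) (required_fields : List String) (out : List String) : Prop := out = analyze_missing_fields_alt data required_fields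
instance (data : List (String × String)) (required_fields : List String) (out : List String) : Decidable (Spec_analyze_missing_fields data required_fields out) := by unfold Spec_analyze_missing_fields; infer_instance

-- ===== CLAIM (what is proved, stated in full; the proofs are below) =====
def Claim_equal_analyze_missing_fields : Prop := ∀ (data : List (String × String)) (required_fields : List String), Dom_analyze_missing_fields data required_fields → Spec_analyze_missing_fields data required_fields (analyze_missing_fields data required_fields)

-- ===== LEMMAS AND PROOFS =====

-- A's per-field keep-condition, as a boolean predicate
def keepA (data : List (String × String)) (field : String) : Bool :=
  data.any (fun kv => kv.1 == field) ||
    (match fieldAliasMap.find? (fun kv => kv.1 == field) with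
     | some pr => pr.2.any (fun a => data.any (fun kv => kv.1 == a))
     | none => false)

-- B's covered set, as a function of the data prefix and the accumulator
def coveredFold (data : List (String × String)) (acc : PySem.Set String) : PySem.Set String :=
  data.foldl (fun cov kv =>
    let cov := PySem.Set.add cov kv.1
    match reverseAliasMap.get? kv.1 with
    | some canonical => PySem.Set.add cov canonical
    | none => cov) acc

-- the field/alias coverage relation both programs compute, as a plain proposition
def CoverProp (data : List (String × String)) (f : String) : Prop :=
  (∃ kv ∈ data, kv.1 = f) ∨ ∃ pr ∈ fieldAliasMap, pr.1 = f ∧ ∃ kv ∈ data, kv.1 ∈ pr.2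

set_option maxHeartbeats 1000000 in
lemma revAliasItems : reverseAliasMap.items = [
    ("normal_concentration", "normal_concentrations"),
    ("abnormal_concentration", "abnormal_concentrations"),
    ("moldb_mono_mass", "monoisotopic_molecular_weight"),
    ("monisotopic_molecular_weight", "monoisotopic_molecular_weight"),
    ("ion", "ions"),
    ("ion_results", "ions"),
    ("ion_data", "ions"),
    ("moldb_formula", "chemical_formula"),
    ("moldb_average_mass", "molecular_weight"),
    ("average_molecular_weight", "molecular_weight"),
    ("moldb_smiles", "smiles"),
    ("moldb_inchi", "inchi"),
    ("moldb_inchikey", "inchikey")] := by decide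

set_option maxHeartbeats 1000000 in
lemma revAliasKeysNodup : reverseAliasMap.keys.Nodup := by decide

set_option maxHeartbeats 1000000 in
lemma rev_get (k f : String) :
    reverseAliasMap.get? k = some f ↔ ∃ pr ∈ fieldAliasMap, pr.1 = f ∧ k ∈ pr.2 := by
  rw [PySem.Dict.get?_eq_some_iff_mem_items reverseAliasMap k f revAliasKeysNodup, revAliasItems]
  constructor
  · intro h
    simp only [List.mem_cons, List.not_mem_nil, or_false, Prod.mk.injEq] at h
    rcases h with ⟨rfl, rfl⟩|⟨rfl, rfl⟩|⟨rfl, rfl⟩|⟨rfl, rfl⟩|⟨rfl, rfl⟩|⟨rfl, rfl⟩|⟨rfl, rfl⟩|⟨rfl, rfl⟩|⟨rfl, rfl⟩|⟨rfl, rfl⟩|⟨rfl, rfl⟩|⟨rfl, rfl⟩|⟨rfl, rfl⟩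
    · exact ⟨("normal_concentrations", ["normal_concentration"]), by decide, rfl, by decide⟩
    · exact ⟨("abnormal_concentrations", ["abnormal_concentration"]), by decide, rfl, by decide⟩
    · exact ⟨("monoisotopic_molecular_weight", ["moldb_mono_mass", "monisotopic_molecular_weight"]), by decide, rfl, by decide⟩
    · exact ⟨("monoisotopic_molecular_weight", ["moldb_mono_mass", "monisotopic_molecular_weight"]), by decide, rfl, by decide⟩
    · exact ⟨("ions", ["ion", "ion_results", "ion_data"]), by decide, rfl, by decide⟩
    · exact ⟨("ions", ["ion", "ion_results", "ion_data"]), by decide, rfl, by decide⟩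
    · exact ⟨("ions", ["ion", "ion_results", "ion_data"]), by decide, rfl, by decide⟩
    · exact ⟨("chemical_formula", ["moldb_formula"]), by decide, rfl, by decide⟩
    · exact ⟨("molecular_weight", ["moldb_average_mass", "average_molecular_weight"]), by decide, rfl, by decide⟩
    · exact ⟨("molecular_weight", ["moldb_average_mass", "average_molecular_weight"]), by decide, rfl, by decide⟩
    · exact ⟨("smiles", ["moldb_smiles"]), by decide, rfl, by decide⟩
    · exact ⟨("inchi", ["moldb_inchi"]), by decide, rfl, by decide⟩
    · exact ⟨("inchikey", ["moldb_inchikey"]), by decide, rfl, by decide⟩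
  · rintro ⟨pr, hpr, hf, hk⟩
    subst hf
    unfold fieldAliasMap at hpr
    fin_cases hpr <;> simp only [List.mem_cons, List.not_mem_nil, or_false] at hk
    · rcases hk with rfl; decide
    · rcases hk with rfl; decide
    · rcases hk with rfl|rfl <;> decide
    · rcases hk with rfl|rfl|rfl <;> decide
    · rcases hk with rfl; decide
    · rcases hk with rfl|rfl <;> decide
    · rcases hk with rfl; decide
    · rcases hk with rfl; decide
    · rcases hk with rfl; decide

lemma mem_step (acc : PySem.Set String) (kv : String × String) (f : String) :
    f ∈ (match reverseAliasMap.get? kv.1 with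
         | some canonical => PySem.Set.add (PySem.Set.add acc kv.1) canonical
         | none => PySem.Set.add acc kv.1) ↔
      f ∈ acc ∨ kv.1 = f ∨ reverseAliasMap.get? kv.1 = some f := by
  cases h : reverseAliasMap.get? kv.1 with
  | none => simp [PySem.Set.mem_add, eq_comm]
  | some c =>
      simp only [PySem.Set.mem_add, Option.some.injEq]
      constructor
      · rintro ((h1 | rfl) | rfl)
        · exact Or.inl h1
        · exact Or.inr (Or.inl rfl)
        · exact Or.inr (Or.inr rfl)
      · rintro (h1 | rfl | rfl)
        · exact Or.inl (Or.inl h1)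
        · exact Or.inl (Or.inr rfl)
        · exact Or.inr rfl

lemma mem_coveredFold (data : List (String × String)) (acc : PySem.Set String) (f : String) :
    f ∈ coveredFold data acc ↔
      f ∈ acc ∨ ∃ kv ∈ data, kv.1 = f ∨ reverseAliasMap.get? kv.1 = some f := by
  induction data generalizing acc with
  | nil => simp [coveredFold]
  | cons kv rest ih =>
      have h1 : (f ∈ coveredFold (kv :: rest) acc) ↔
          f ∈ coveredFold rest
            (match reverseAliasMap.get? kv.1 with
             | some canonical => PySem.Set.add (PySem.Set.add acc kv.1) canonical
             | none => PySem.Set.add acc kv.1) := Iff.rfl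
      rw [h1, ih, mem_step]
      constructor
      · rintro ((h | h | h) | ⟨kv', hkv', hp⟩)
        · exact Or.inl h
        · exact Or.inr ⟨kv, List.mem_cons_self, Or.inl h⟩
        · exact Or.inr ⟨kv, List.mem_cons_self, Or.inr h⟩
        · exact Or.inr ⟨kv', List.mem_cons_of_mem _ hkv', hp⟩
      · rintro (h | ⟨kv', hkv', hp⟩)
        · exact Or.inl (Or.inl h)
        · rcases List.mem_cons.mp hkv' with rfl | hm
          · exact Or.inl (Or.inr hp)
          · exact Or.inr ⟨kv', hm, hp⟩

lemma pairwise_ne_keys :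
    fieldAliasMap.Pairwise (fun a b => a.1 ≠ b.1) := by decide

lemma eq_of_mem_same_key {α β : Type} {l : List (α × β)}
    (hp : l.Pairwise (fun a b => a.1 ≠ b.1))
    {pr pr' : α × β} (h : pr ∈ l) (h' : pr' ∈ l) (hk : pr.1 = pr'.1) : pr = pr' := by
  induction l with
  | nil => cases h
  | cons x xs ih =>
      rw [List.pairwise_cons] at hp
      rcases List.mem_cons.mp h with h1 | h1 <;> rcases List.mem_cons.mp h' with h2 | h2
      · rw [h1, h2]
      · subst h1; exact absurd hk (hp.1 _ h2)
      · subst h2; exact absurd hk.symm (hp.1 _ h1)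
      · exact ih hp.2 h1 h2

lemma covered_iff (data : List (String × String)) (f : String) :
    f ∈ coveredFold data PySem.Set.empty ↔ CoverProp data f := by
  rw [mem_coveredFold]
  have hemp : (f ∈ (PySem.Set.empty : PySem.Set String)) ↔ False := by
    simp [PySem.Set.empty]
  rw [hemp]
  simp only [false_or, CoverProp]
  constructor
  · rintro ⟨kv, hkv, h | h⟩
    · exact Or.inl ⟨kv, hkv, h⟩
    · rcases (rev_get _ _).mp h with ⟨pr, hpr, hf, hal⟩
      exact Or.inr ⟨pr, hpr, hf, kv, hkv, hal⟩
  · rintro (⟨kv, hkv, h⟩ | ⟨pr, hpr, hf, kv, hkv, hal⟩)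
    · exact ⟨kv, hkv, Or.inl h⟩
    · exact ⟨kv, hkv, Or.inr ((rev_get _ _).mpr ⟨pr, hpr, hf, hal⟩)⟩

lemma keepA_iff (data : List (String × String)) (f : String) :
    keepA data f = true ↔ CoverProp data f := by
  unfold keepA CoverProp
  cases hf : fieldAliasMap.find? (fun kv => kv.1 == f) with
  | none =>
      have hno : ∀ pr ∈ fieldAliasMap, pr.1 ≠ f := by
        intro pr hpr
        have := List.find?_eq_none.mp hf pr hpr
        simpa using this
      simp only [Bool.or_false, List.any_eq_true, beq_iff_eq]
      constructor
      · rintro ⟨kv, hkv, h⟩; exact Or.inl ⟨kv, hkv, h⟩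
      · rintro (⟨kv, hkv, h⟩ | ⟨pr, hpr, hf', _⟩)
        · exact ⟨kv, hkv, h⟩
        · exact absurd hf' (hno pr hpr)
  | some pr0 =>
      have hmem : pr0 ∈ fieldAliasMap := List.mem_of_find?_eq_some hf
      have hkey : pr0.1 = f := by
        have := List.find?_some hf
        simpa using this
      simp only [Bool.or_eq_true, List.any_eq_true, beq_iff_eq]
      constructor
      · rintro (⟨kv, hkv, h⟩ | ⟨a, ha, kv, hkv, h⟩)
        · exact Or.inl ⟨kv, hkv, h⟩
        · exact Or.inr ⟨pr0, hmem, hkey, kv, hkv, h ▸ ha⟩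
      · rintro (⟨kv, hkv, h⟩ | ⟨pr, hpr, hf', kv, hkv, hal⟩)
        · exact Or.inl ⟨kv, hkv, h⟩
        · have hpr0 : pr = pr0 :=
            eq_of_mem_same_key pairwise_ne_keys hpr hmem (by rw [hf', hkey])
          subst hpr0
          exact Or.inr ⟨kv.1, hal, kv, hkv, rfl⟩

lemma covered_contains_eq (data : List (String × String)) (f : String) :
    (coveredFold data PySem.Set.empty).contains f = keepA data f := by
  rw [Bool.eq_iff_iff, keepA_iff, ← covered_iff]
  exact List.contains_iff_mem

theorem analyze_missing_fields_spec_aux (data : List (String × String)) (rf : List String) :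
    analyze_missing_fields data rf = analyze_missing_fields_alt data rf := by
  unfold analyze_missing_fields analyze_missing_fields_alt
  cases data.isEmpty
  · simp only [Bool.false_eq_true, if_false]
    have hstep : (fun (missing : List String) (field : String) =>
        if data.any (fun kv => kv.1 == field) then missing
        else
          match fieldAliasMap.find? (fun kv => kv.1 == field) with
          | some pr =>
              if pr.2.any (fun a => data.any (fun kv => kv.1 == a)) then missing
              else missing ++ [field]
          | none => missing ++ [field])
        = fun missing field => if !keepA data field then missing ++ [field] else missing := by
      funext missing field
      cases hf : fieldAliasMap.find? (fun kv => kv.1 == field) with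
      | none =>
          cases hda : data.any (fun kv => kv.1 == field) <;> simp [keepA, hda, hf]
      | some pr =>
          cases hda : data.any (fun kv => kv.1 == field) <;>
            cases hal : pr.2.any (fun a => data.any (fun kv => kv.1 == a)) <;>
              simp [keepA, hda, hf, hal]
    rw [hstep, PySem.List.foldl_append_if_eq_filter]
    simp only [List.nil_append]
    exact List.filter_congr
      (fun f _ => congrArg (fun b => !b) (covered_contains_eq data f).symm)
  · simp

-- ===== VERDICT (by name: the statement is the Claim_ definition above) =====
theorem analyze_missing_fields_spec : Claim_equal_analyze_missing_fields := by
  intro data rf _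
  exact analyze_missing_fields_spec_aux data rf
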